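-- pv_equiv track=rewrite | github.com/Becker-ZH/CountSeg | Result-Analysis/statistic_object.py | dict_count
-- ===== SOURCE A (Python) =====
-- def dict_count(array):
--     dict = {}
--     objNo = 0
--     typeNo = 0
--     for a in range(len(array)):
--         count = int(array[a])
--         if count > 0:
--             objNo += count
--             typeNo += 1
--         dict[a] = count
--     return objNo, typeNo, dict
-- ===== SOURCE B (Python) =====
-- def dict_count(array):
--     # divide-and-conquer: recursively split the index range, combine aggregates
--     # and (index, value) pair lists, then build the dict once at the end
--     def go(lo, hi):
--         if hi - lo == 0:
--             return 0, 0, []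
--         if hi - lo == 1:
--             c = int(array[lo])
--             if c > 0:
--                 return c, 1, [(lo, c)]
--             return 0, 0, [(lo, c)]
--         mid = (lo + hi) // 2
--         o1, t1, p1 = go(lo, mid)
--         o2, t2, p2 = go(mid, hi)
--         return o1 + o2, t1 + t2, p1 + p2
--     objNo, typeNo, pairs = go(0, len(array))
--     return objNo, typeNo, dict(pairs)
-- ===== Notes on version B (the rewrite author's own statement) =====
-- stated objective: alternative
-- what changed: A's single fused left-to-right index loop is replaced by a divide-and-conquer recursion that splits the index range in half, combines the (sum, count, pairs) results of the two halves, and builds the dict once from the combined pair list.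
import Mathlib
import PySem

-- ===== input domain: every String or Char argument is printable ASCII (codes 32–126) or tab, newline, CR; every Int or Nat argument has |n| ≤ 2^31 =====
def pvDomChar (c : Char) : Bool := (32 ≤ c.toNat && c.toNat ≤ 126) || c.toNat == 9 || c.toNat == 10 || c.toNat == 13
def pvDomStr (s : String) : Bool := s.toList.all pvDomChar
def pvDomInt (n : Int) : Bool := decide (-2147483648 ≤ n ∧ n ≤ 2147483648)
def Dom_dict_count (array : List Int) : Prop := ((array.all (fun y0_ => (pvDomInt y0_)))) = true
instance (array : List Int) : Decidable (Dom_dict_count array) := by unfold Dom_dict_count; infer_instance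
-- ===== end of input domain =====

-- B replaces A's single fused left-to-right index loop by a divide-and-conquer
-- recursion over index ranges whose half-results are combined, the dict being
-- built once from the combined pair list; objective: alternative.

-- ===== PORT A =====
def dict_count (array : List Int) : Int × Int × (List (Int × Int)) :=
  let res := (PySem.List.pyRange 0 (PySem.List.len array) 1).foldl
    (fun (st : Int × Int × PySem.Dict Int Int) a =>
      let count := PySem.List.pyGetD array a 0
      let objNo := st.1
      let typeNo := st.2.1
      let d := st.2.2
      let objNo := if count > 0 then objNo + count else objNo
      let typeNo := if count > 0 then typeNo + 1 else typeNo
      (objNo, typeNo, d.insert a count))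
    (0, 0, PySem.Dict.empty)
  (res.1, res.2.1, res.2.2.items)

-- ===== PORT B =====
-- go(lo, hi) of Source B; lo, hi are the always-nonnegative range bounds, so Nat
-- with Nat division is exact for Python's (lo + hi) // 2 here.
def dcGo (array : List Int) (lo hi : Nat) : Int × Int × List (Int × Int) :=
  if hi - lo = 0 then (0, 0, [])
  else if hi - lo = 1 then
    let c := PySem.List.pyGetD array (lo : Int) 0
    if c > 0 then (c, 1, [((lo : Int), c)]) else (0, 0, [((lo : Int), c)])
  else
    ((dcGo array lo ((lo + hi) / 2)).1 + (dcGo array ((lo + hi) / 2) hi).1,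
     (dcGo array lo ((lo + hi) / 2)).2.1 + (dcGo array ((lo + hi) / 2) hi).2.1,
     (dcGo array lo ((lo + hi) / 2)).2.2 ++ (dcGo array ((lo + hi) / 2) hi).2.2)
termination_by hi - lo
decreasing_by all_goals omega

def dict_count_alt (array : List Int) : Int × Int × (List (Int × Int)) :=
  let r := dcGo array 0 array.length
  (r.1, r.2.1, (PySem.Dict.ofList r.2.2 : PySem.Dict Int Int).items)

-- ===== PRECONDITION & SPEC =====
def Spec_dict_count (array : List Int) (out : Int × Int × (List (Int × Int))) : Prop := out = dict_count_alt array
instance (array : List Int) (out : Int × Int × (List (Int × Int))) : Decidable (Spec_dict_count array out) := by unfold Spec_dict_count; infer_instance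

-- ===== CLAIM (what is proved, stated in full; the proofs are below) =====
def Claim_equal_dict_count : Prop := ∀ (array : List Int), Dom_dict_count array → Spec_dict_count array (dict_count array)

-- ===== LEMMAS AND PROOFS =====

-- an index loop a=0..len-1 reading array[a] is a fold over enumerate(array)
theorem pv_fold_idx {σ : Type} (full : List Int) (g : σ → Int → Int → σ) :
    ∀ (xs : List Int) (s : Nat), full.drop s = xs → ∀ (init : σ),
      (PySem.List.pyRange (s : Int) (full.length : Int) 1).foldl
          (fun st a => g st a (PySem.List.pyGetD full a 0)) init
      = (PySem.List.enumerate xs (s : Int)).foldl (fun st p => g st p.1 p.2) init := by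
  intro xs
  induction xs with
  | nil =>
      intro s hdrop init
      have hlen : full.length ≤ s := by
        by_contra h
        have := List.drop_eq_nil_iff.mp hdrop
        omega
      rw [PySem.List.pyRange_one_eq_nil (by exact_mod_cast hlen)]
      simp [PySem.List.enumerate_nil]
  | cons x xs ih =>
      intro s hdrop init
      have hs : s < full.length := by
        by_contra h
        rw [List.drop_eq_nil_iff.mpr (by omega)] at hdrop
        simp at hdrop
      have hget : full[s] = x := by
        have hcd : full[s] :: full.drop (s + 1) = full.drop s := List.getElem_cons_drop hs
        rw [hdrop] at hcd
        exact (List.cons.injEq _ _ _ _ ▸ hcd).1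
      have hdrop' : full.drop (s + 1) = xs := by
        have hcd : full[s] :: full.drop (s + 1) = full.drop s := List.getElem_cons_drop hs
        rw [hdrop, hget] at hcd
        exact (List.cons.injEq _ _ _ _ ▸ hcd).2
      rw [PySem.List.pyRange_one_cons (by exact_mod_cast hs)]
      rw [PySem.List.enumerate_cons]
      simp only [List.foldl_cons]
      have hgd : PySem.List.pyGetD full (s : Int) 0 = x := by
        rw [PySem.List.pyGetD_natCast]
        simp [List.getD, hs, hget]
      rw [hgd]
      have : ((s : Int) + 1) = ((s + 1 : Nat) : Int) := by push_cast; ring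
      rw [this, ih (s + 1) hdrop']

-- A's loop over enumerate: closed form of the accumulated triple
theorem pv_loopA (xs : List Int) :
    ∀ (s o t : Int) (d : PySem.Dict Int Int), (∀ k ∈ d.keys, k < s) →
      (PySem.List.enumerate xs s).foldl
          (fun (st : Int × Int × PySem.Dict Int Int) p =>
            (if p.2 > 0 then st.1 + p.2 else st.1,
             if p.2 > 0 then st.2.1 + 1 else st.2.1,
             st.2.2.insert p.1 p.2)) (o, t, d)
      = (o + (xs.filter (fun c => decide (c > 0))).sum,
         t + ((xs.filter (fun c => decide (c > 0))).length : Int),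
         PySem.Dict.mk (d.items ++ PySem.List.enumerate xs s)) := by
  induction xs with
  | nil =>
      intro s o t d hd
      simp [PySem.List.enumerate_nil]
  | cons x xs ih =>
      intro s o t d hd
      rw [PySem.List.enumerate_cons]
      simp only [List.foldl_cons]
      have hnc : d.contains s = false := by
        rw [PySem.Dict.contains_eq_decide_mem_keys]
        simp only [decide_eq_false_iff_not]
        intro hmem
        exact absurd (hd s hmem) (by omega)
      have hins : (d.insert s x).items = d.items ++ [(s, x)] :=
        PySem.Dict.items_insert_of_not_contains _ _ hnc
      have hkeys : ∀ k ∈ (d.insert s x).keys, k < s + 1 := by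
        intro k hk
        rcases (PySem.Dict.mem_keys_insert _ _ _ _).mp hk with h | h
        · omega
        · have := hd k h; omega
      rw [ih (s + 1) _ _ _ hkeys]
      by_cases hx : x > 0 <;> simp [hx, hins] <;> constructor <;> ring_nf

-- go(lo, hi) computes the aggregates and enumerated pairs of array[lo:hi]
theorem pv_go_spec (array : List Int) :
    ∀ (n lo hi : Nat), hi - lo = n → hi ≤ array.length →
      dcGo array lo hi =
        (((((array.drop lo).take (hi - lo)).filter (fun c => decide (c > 0))).sum),
         (((((array.drop lo).take (hi - lo)).filter (fun c => decide (c > 0))).length : Int)),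
         PySem.List.enumerate ((array.drop lo).take (hi - lo)) (lo : Int)) := by
  intro n
  induction n using Nat.strong_induction_on with
  | _ n ih =>
    intro lo hi hn hhi
    unfold dcGo
    by_cases h0 : hi - lo = 0
    · simp [h0, PySem.List.enumerate_nil]
    · by_cases h1 : hi - lo = 1
      · have hlo : lo < array.length := by omega
        have hseg : (array.drop lo).take (hi - lo) = [array[lo]] := by
          rw [h1]
          rw [List.take_one]
          have : (array.drop lo).head? = some array[lo] := by
            rw [List.head?_drop]
            simp [hlo]
          simp [this]
        have hgd : PySem.List.pyGetD array (lo : Int) 0 = array[lo] := by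
          rw [PySem.List.pyGetD_natCast]
          simp [List.getD, hlo]
        rw [if_neg h0, if_pos h1, hseg, hgd]
        by_cases hx : array[lo] > 0 <;>
          simp [hx, PySem.List.enumerate_cons, PySem.List.enumerate_nil]
      · rw [if_neg h0, if_neg h1]
        have hlt1 : (lo + hi) / 2 - lo < n := by omega
        have hlt2 : hi - (lo + hi) / 2 < n := by omega
        have hmid1 : lo ≤ (lo + hi) / 2 := by omega
        have hmid2 : (lo + hi) / 2 ≤ hi := by omega
        rw [ih _ hlt1 lo _ rfl (by omega), ih _ hlt2 _ hi rfl hhi]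
        have hdd : (array.drop lo).drop ((lo + hi) / 2 - lo)
            = array.drop ((lo + hi) / 2) := by
          rw [List.drop_drop]; congr 1; omega
        have hsum : hi - lo = ((lo + hi) / 2 - lo) + (hi - (lo + hi) / 2) := by omega
        have hsplit : (array.drop lo).take (hi - lo)
            = (array.drop lo).take ((lo + hi) / 2 - lo)
              ++ (array.drop ((lo + hi) / 2)).take (hi - (lo + hi) / 2) := by
          rw [hsum, List.take_add, hdd]
        rw [hsplit]
        have hlen : ((array.drop lo).take ((lo + hi) / 2 - lo)).length
            = (lo + hi) / 2 - lo := by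
          simp
          omega
        simp only [PySem.List.enumerate_append, List.filter_append, List.sum_append,
          List.length_append, hlen, Prod.mk.injEq]
        refine ⟨trivial, ?_, ?_⟩
        · push_cast; ring
        · have hc : (lo : Int) + (((lo + hi) / 2 - lo : Nat) : Int)
              = (((lo + hi) / 2 : Nat) : Int) := by omega
          rw [hc]

-- keys of enumerate are ≥ the start, hence pairwise distinct
theorem pv_enum_keys_nodup (xs : List Int) (s : Int) :
    ((PySem.List.enumerate xs s).map Prod.fst).Nodup := by
  have h := PySem.List.pairwise_lt_enumerate (xs := xs) (s := s)
  have : ((PySem.List.enumerate xs s).map Prod.fst).Pairwise (· < ·) :=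
    List.pairwise_map.mpr h
  exact this.nodup

-- dict(pairs) on distinct keys keeps the pairs
theorem pv_ofList_items (l : List (Int × Int)) (h : (l.map Prod.fst).Nodup) :
    (PySem.Dict.ofList l : PySem.Dict Int Int).items = l := by
  have hfresh : ∀ p ∈ l, (PySem.Dict.empty : PySem.Dict Int Int).contains (Prod.fst p) = false := by
    intro p _
    exact PySem.Dict.contains_empty _
  have := PySem.Dict.items_foldl_insert_fresh l Prod.fst Prod.snd PySem.Dict.empty hfresh h
  simpa [PySem.Dict.ofList] using this

-- ===== VERDICT (by name: the statement is the Claim_ definition above) =====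
theorem dict_count_spec : Claim_equal_dict_count := by
  intro array _
  unfold Spec_dict_count dict_count dict_count_alt
  have hidx := pv_fold_idx array
    (fun (st : Int × Int × PySem.Dict Int Int) a c =>
      (if c > 0 then st.1 + c else st.1,
       if c > 0 then st.2.1 + 1 else st.2.1,
       st.2.2.insert a c))
    array 0 (by simp) ((0 : Int), (0 : Int), PySem.Dict.empty)
  have hloop := pv_loopA array 0 0 0 PySem.Dict.empty (by simp [PySem.Dict.keys_empty])
  have hgo := pv_go_spec array (array.length) 0 array.length (by omega) (by omega)
  simp only [Nat.sub_zero, List.drop_zero, List.take_length, Nat.cast_zero] at hgo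
  simp only [PySem.List.len_eq, Nat.cast_zero] at hidx ⊢
  rw [hidx, hloop, hgo]
  rw [pv_ofList_items _ (pv_enum_keys_nodup array 0)]
  have hei : (PySem.Dict.empty : PySem.Dict Int Int).items = ([] : List (Int × Int)) := rfl
  simp [hei]
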